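-- pv_equiv track=rewrite | github.com/Dejke/advanced-algorithm-labs | lab2/lab2morenodes.py | binary_decoding
-- ===== SOURCE A (Python) =====
-- def binary_decoding(int_set):
--     assert(isinstance(int_set, int))
--     list = []
--     while int_set > 0:
--         highest_bit = int_set.bit_length() - 1
--         list.append(highest_bit)
--         int_set ^=  (1 << highest_bit) # flip highest bit to 0
--     return list
-- ===== SOURCE B (Python) =====
-- def binary_decoding(int_set):
--     assert(isinstance(int_set, int))
--     result = []
--     pos = 0
--     while int_set > 0:
--         if int_set & 1:
--             result.append(pos)
--         int_set >>= 1
--         pos += 1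
--     return result[::-1]
-- ===== Notes on version B (the rewrite author's own statement) =====
-- stated objective: alternative
-- what changed: Replaced the repeated bit_length()-and-xor extraction of the highest set bit with a single ascending low-to-high shift scan that collects set-bit positions and reverses the list at the end.
import Mathlib
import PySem

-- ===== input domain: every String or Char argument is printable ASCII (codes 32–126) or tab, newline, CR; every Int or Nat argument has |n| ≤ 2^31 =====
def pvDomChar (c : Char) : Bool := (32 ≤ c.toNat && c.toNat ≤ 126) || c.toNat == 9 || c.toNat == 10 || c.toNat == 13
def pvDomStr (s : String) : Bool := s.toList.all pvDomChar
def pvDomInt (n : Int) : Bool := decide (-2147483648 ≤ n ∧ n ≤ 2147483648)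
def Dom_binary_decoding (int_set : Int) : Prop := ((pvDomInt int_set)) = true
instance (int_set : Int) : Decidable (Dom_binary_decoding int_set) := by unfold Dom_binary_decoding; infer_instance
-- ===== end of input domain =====

-- B replaces A's repeated highest-bit extraction (bit_length + xor) by a single ascending
-- low-to-high shift scan whose result is reversed at the end (objective: alternative).


-- ===== PORT A =====
-- Python's int.bit_length for a nonnegative value (A only calls it on positive values).
def pyBitLength (n : Nat) : Nat := if n = 0 then 0 else n.log2 + 1

-- Arithmetic fact used by the ports' termination proofs (and the equivalence proof):
-- xor-ing away the top bit is subtraction of that power of two.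
theorem xor_two_pow (k r : Nat) (h : r < 2 ^ k) : (2 ^ k + r) ^^^ (2 ^ k) = r := by
  apply Nat.eq_of_testBit_eq
  intro i
  rcases lt_trichotomy i k with hi | rfl | hi
  · simp [Nat.testBit_xor, Nat.testBit_two_pow_add_gt hi,
      Nat.testBit_two_pow_of_ne (by omega : k ≠ i)]
  · simp [Nat.testBit_xor, Nat.testBit_two_pow_add_eq, Nat.testBit_eq_false_of_lt h]
  · have hle : 2 ^ (k + 1) ≤ 2 ^ i := Nat.pow_le_pow_right (by norm_num) (by omega)
    rw [pow_succ] at hle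
    have hr : r < 2 ^ i := by omega
    have h1 : 2 ^ k + r < 2 ^ i := by omega
    simp [Nat.testBit_xor, Nat.testBit_eq_false_of_lt h1, Nat.testBit_eq_false_of_lt hr,
      Nat.testBit_two_pow_of_ne (by omega : k ≠ i)]

-- restated as a subtraction, for a value with its top bit set
theorem xor_log2 (n : Nat) (h : n ≠ 0) : n ^^^ (1 <<< (pyBitLength n - 1)) = n - 2 ^ n.log2 := by
  have hk1 : 2 ^ n.log2 ≤ n := Nat.log2_self_le h
  have hk2 : n < 2 ^ (n.log2 + 1) := Nat.lt_log2_self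
  rw [pow_succ] at hk2
  have hb : pyBitLength n - 1 = n.log2 := by simp [pyBitLength, h]
  rw [hb, Nat.one_shiftLeft]
  have hr : n - 2 ^ n.log2 < 2 ^ n.log2 := by omega
  have hx := xor_two_pow n.log2 (n - 2 ^ n.log2) hr
  have hn : 2 ^ n.log2 + (n - 2 ^ n.log2) = n := by omega
  rwa [hn] at hx

theorem binA_dec (n : Nat) (h : n ≠ 0) : n ^^^ (1 <<< (pyBitLength n - 1)) < n := by
  rw [xor_log2 n h]
  have : 0 < 2 ^ n.log2 := Nat.two_pow_pos _
  omega

-- A's while loop: repeatedly take the highest set bit, append it, clear it by xor.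
def binA_loop (n : Nat) (acc : List Int) : List Int :=
  if h : n = 0 then acc
  else
    let highest_bit := pyBitLength n - 1
    binA_loop (n ^^^ (1 <<< highest_bit)) (acc ++ [(highest_bit : Int)])
  termination_by n
  decreasing_by exact binA_dec n h

-- loop guard `int_set > 0` becomes `toNat ≠ 0` (toNat int_set = 0 exactly when int_set ≤ 0)
def binary_decoding (int_set : Int) : List Int :=
  binA_loop int_set.toNat []

-- ===== PORT B =====
-- B's while loop: test the low bit, append the current position if set, shift right.
def binB_loop (n : Nat) (pos : Nat) (acc : List Int) : List Int :=
  if h : n = 0 then acc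
  else binB_loop (n >>> 1) (pos + 1) (if n &&& 1 = 1 then acc ++ [(pos : Int)] else acc)
  termination_by n
  decreasing_by simp only [Nat.shiftRight_one]; omega

-- result[::-1] ported as List.reverse
def binary_decoding_alt (int_set : Int) : List Int :=
  (binB_loop int_set.toNat 0 []).reverse

-- ===== PRECONDITION & SPEC =====
def Spec_binary_decoding (int_set : Int) (out : List Int) : Prop := out = binary_decoding_alt int_set
instance (int_set : Int) (out : List Int) : Decidable (Spec_binary_decoding int_set out) := by unfold Spec_binary_decoding; infer_instance

-- ===== CLAIM (what is proved, stated in full; the proofs are below) =====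
def Claim_equal_binary_decoding : Prop := ∀ (int_set : Int), Dom_binary_decoding int_set → Spec_binary_decoding int_set (binary_decoding int_set)

-- ===== LEMMAS AND PROOFS =====

theorem binA_unfold (n : Nat) (acc : List Int) (h : n ≠ 0) :
    binA_loop n acc
      = binA_loop (n ^^^ (1 <<< (pyBitLength n - 1))) (acc ++ [((pyBitLength n - 1 : Nat) : Int)]) := by
  rw [binA_loop]; simp [h]

theorem binB_unfold (n p : Nat) (acc : List Int) (h : n ≠ 0) :
    binB_loop n p acc
      = binB_loop (n >>> 1) (p + 1) (if n &&& 1 = 1 then acc ++ [(p : Int)] else acc) := by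
  rw [binB_loop]; simp [h]

theorem binA_loop_append (n : Nat) : ∀ acc, binA_loop n acc = acc ++ binA_loop n [] := by
  induction n using Nat.strong_induction_on with
  | _ n ih =>
    intro acc
    by_cases h : n = 0
    · simp [binA_loop, h]
    · have ihn := ih _ (binA_dec n h)
      rw [binA_unfold n acc h, binA_unfold n [] h,
        ihn (acc ++ [((pyBitLength n - 1 : Nat) : Int)]),
        ihn ([] ++ [((pyBitLength n - 1 : Nat) : Int)])]
      simp

theorem binB_loop_append (n : Nat) : ∀ p acc, binB_loop n p acc = acc ++ binB_loop n p [] := by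
  induction n using Nat.strong_induction_on with
  | _ n ih =>
    intro p acc
    by_cases h : n = 0
    · simp [binB_loop, h]
    · have hlt : n >>> 1 < n := by simp only [Nat.shiftRight_one]; omega
      have ihn := ih _ hlt
      rw [binB_unfold n p acc h, binB_unfold n p [] h,
        ihn (p + 1) (if n &&& 1 = 1 then acc ++ [(p : Int)] else acc),
        ihn (p + 1) (if n &&& 1 = 1 then [] ++ [(p : Int)] else [])]
      simp only [Nat.and_one_is_mod]
      by_cases hb : n % 2 = 1 <;> simp [hb]

-- one-step unfolding of B's loop, valid also at n = 0
theorem binB_step (n p : Nat) :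
    binB_loop n p [] = (if n % 2 = 1 then [(p : Int)] else []) ++ binB_loop (n / 2) (p + 1) [] := by
  by_cases h : n = 0
  · subst h; simp [binB_loop]
  · rw [binB_unfold n p [] h]
    simp only [Nat.and_one_is_mod, Nat.shiftRight_one]
    rw [binB_loop_append]
    by_cases hb : n % 2 = 1 <;> simp [hb]

-- splitting off the top bit: B's ascending scan lists the low part first, then the top position
theorem binB_split (k : Nat) : ∀ r p, r < 2 ^ k →
    binB_loop (2 ^ k + r) p [] = binB_loop r p [] ++ [((p + k : Nat) : Int)] := by
  induction k with
  | zero =>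
    intro r p h
    have : r = 0 := by omega
    subst this
    simp [binB_step 1 p, binB_loop]
  | succ k ih =>
    intro r p h
    have h2 : 2 ^ (k + 1) = 2 * 2 ^ k := by ring
    have hmod : (2 ^ (k + 1) + r) % 2 = r % 2 := by omega
    have hdiv : (2 ^ (k + 1) + r) / 2 = 2 ^ k + r / 2 := by omega
    rw [binB_step (2 ^ (k + 1) + r) p, hmod, hdiv,
      ih (r / 2) (p + 1) (by omega), binB_step r p]
    have : ((p + 1 + k : Nat) : Int) = ((p + (k + 1) : Nat) : Int) := by norm_num; ring
    rw [this]
    simp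

theorem binA_eq_binB (n : Nat) : binA_loop n [] = (binB_loop n 0 []).reverse := by
  induction n using Nat.strong_induction_on with
  | _ n ih =>
    by_cases h : n = 0
    · simp [h, binA_loop, binB_loop]
    · have hk1 : 2 ^ n.log2 ≤ n := Nat.log2_self_le h
      have hk2 : n < 2 ^ (n.log2 + 1) := Nat.lt_log2_self
      rw [pow_succ] at hk2
      have hpos : 0 < 2 ^ n.log2 := Nat.two_pow_pos _
      have hb : pyBitLength n - 1 = n.log2 := by simp [pyBitLength, h]
      have hn : n = 2 ^ n.log2 + (n - 2 ^ n.log2) := by omega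
      -- A's side: peel off the highest bit
      rw [binA_unfold n [] h, binA_loop_append, xor_log2 n h, hb, ih _ (by omega)]
      -- B's side: split the input at its highest bit
      have hsplit := binB_split n.log2 (n - 2 ^ n.log2) 0 (by omega)
      rw [← hn] at hsplit
      rw [hsplit]
      simp

-- ===== VERDICT (by name: the statement is the Claim_ definition above) =====
theorem binary_decoding_spec : Claim_equal_binary_decoding := by
  intro int_set _
  unfold Spec_binary_decoding binary_decoding binary_decoding_alt
  exact binA_eq_binB int_set.toNat
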